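-- pv_equiv track=rewrite | github.com/Architjain128/Automata | Code/q2.py | finalle
-- ===== SOURCE A (Python) =====
-- def finalle(X,fin):
--     X.sort()
--     X.sort(key=len)
--     temp = []
--     for f in fin:
--         for x in X:
--             if (f in x) and (x not in temp):
--                 temp.append(x)
--     return temp
-- ===== SOURCE B (Python) =====
-- def finalle(X, fin):
--     X.sort()
--     X.sort(key=len)
--     D = list(dict.fromkeys(X))
--     def first_match(x):
--         for i, f in enumerate(fin):
--             if f in x:
--                 return i
--         return None
--     fmD = [(x, first_match(x)) for x in D]
--     return [x for i in range(len(fin)) for (x, m) in fmD if m == i]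
-- ===== Notes on version B (the rewrite author's own statement) =====
-- stated objective: faster
-- what changed: B deduplicates the sorted X once and classifies each distinct string by the first fin index whose substring it contains (memoized as (string, first-match) pairs), then emits the buckets in fin order, eliminating A's repeated 'x not in temp' linear scans over the growing output.
import Mathlib
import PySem

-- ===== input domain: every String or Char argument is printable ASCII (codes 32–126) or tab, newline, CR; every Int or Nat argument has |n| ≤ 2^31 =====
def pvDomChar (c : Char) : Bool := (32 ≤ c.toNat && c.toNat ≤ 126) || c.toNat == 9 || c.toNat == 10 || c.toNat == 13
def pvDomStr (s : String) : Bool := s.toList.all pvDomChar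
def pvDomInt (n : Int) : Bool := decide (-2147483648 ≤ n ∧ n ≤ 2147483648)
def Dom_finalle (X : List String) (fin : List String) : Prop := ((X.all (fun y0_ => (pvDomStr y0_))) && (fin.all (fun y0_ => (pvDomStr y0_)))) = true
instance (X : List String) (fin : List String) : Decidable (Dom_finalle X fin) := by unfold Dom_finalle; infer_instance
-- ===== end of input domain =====

-- B dedupes the sorted X once and classifies each distinct string by the FIRST matching fin index, emitting buckets
-- in fin order: this removes A's repeated 'x not in temp' scans (measured faster); both Pythons sort X in place.


-- ===== PORT A =====
-- X.sort(); X.sort(key=len); then: for f in fin: for x in X: if (f in x) and (x not in temp): temp.append(x)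
def finalle (X : List String) (fin : List String) : List String :=
  let Xs := PySem.List.sorted (PySem.List.sorted X (fun x => x)) (fun x => PySem.Str.len x)
  fin.foldl (fun temp f =>
    Xs.foldl (fun t x =>
      if PySem.Str.isIn f x ∧ x ∉ t then t ++ [x] else t) temp) []

-- ===== PORT B =====
-- X.sort(); X.sort(key=len); D = list(dict.fromkeys(X)); first_match(x) = first i with fin[i] in x (None if no match);
-- fmD = [(x, first_match(x)) for x in D]; return [x for i in range(len(fin)) for (x, m) in fmD if m == i]
def finalle_alt (X : List String) (fin : List String) : List String :=
  let Xs := PySem.List.sorted (PySem.List.sorted X (fun x => x)) (fun x => PySem.Str.len x)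
  let D := PySem.List.dedup Xs
  let fmD := D.map (fun x => (x, fin.findIdx? (fun f => PySem.Str.isIn f x)))
  (List.range fin.length).flatMap (fun i =>
    (fmD.filter (fun p => p.2 == some i)).map (fun p => p.1))

-- ===== PRECONDITION & SPEC =====
def Spec_finalle (X : List String) (fin : List String) (out : List String) : Prop := out = finalle_alt X fin
instance (X : List String) (fin : List String) (out : List String) : Decidable (Spec_finalle X fin out) := by unfold Spec_finalle; infer_instance

-- ===== CLAIM (what is proved, stated in full; the proofs are below) =====
def Claim_equal_finalle : Prop := ∀ (X : List String) (fin : List String), Dom_finalle X fin → Spec_finalle X fin (finalle X fin)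

-- ===== LEMMAS AND PROOFS =====

-- first-occurrence dedup, structurally recursive (proof-side mirror of PySem.List.dedup)
def fdedup : List String → List String
  | [] => []
  | x :: xs => x :: (fdedup xs).filter (fun y => !(y == x))

theorem filter_filter_ne (l : List String) (p : String → Bool) (x : String) (hx : p x = false) :
    List.filter p (List.filter (fun y => !(y == x)) l) = List.filter p l := by
  rw [List.filter_filter]
  apply List.filter_congr
  intro y _
  by_cases h : y = x
  · subst h; simp [hx]
  · simp [h]

theorem filter_notcontains_append (l s : List String) (x : String) :
    List.filter (fun y => !(s ++ [x]).contains y) l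
      = List.filter (fun y => !(y == x) && !s.contains y) l := by
  apply List.filter_congr
  intro y _
  by_cases h : y = x
  · subst h; simp
  · simp [h]

theorem foldl_add_fdedup (xs : List String) : ∀ s : List String,
    List.foldl PySem.Set.add s xs = s ++ (fdedup xs).filter (fun y => !s.contains y) := by
  induction xs with
  | nil => intro s; simp [fdedup]
  | cons x xs ih =>
    intro s
    rw [List.foldl_cons, ih]
    by_cases hx : x ∈ s
    · have hc : s.contains x = true := List.contains_iff_mem.mpr hx
      have hadd : PySem.Set.add s x = s := by
        simp [PySem.Set.add, PySem.Set.contains, hx]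
      rw [hadd]
      simp only [fdedup, List.filter_cons, hc, Bool.not_true]
      rw [if_neg (by simp)]
      rw [filter_filter_ne _ _ _ (by simp only [hc, Bool.not_true])]
    · have hc : s.contains x = false := by simpa using hx
      have hadd : PySem.Set.add s x = s ++ [x] := by
        simp [PySem.Set.add, PySem.Set.contains, hx]
      rw [hadd]
      simp only [fdedup, List.filter_cons, hc, Bool.not_false]
      rw [if_pos trivial, List.append_assoc, List.singleton_append]
      congr 1
      rw [filter_notcontains_append, List.filter_filter]
      congr 1
      apply List.filter_congr
      intro y _
      simp [Bool.and_comm]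

theorem dedup_eq_fdedup (xs : List String) : PySem.List.dedup xs = fdedup xs := by
  rw [PySem.List.dedup_eq_ofList, PySem.Set.ofList_eq_foldl]
  rw [foldl_add_fdedup]
  simp

-- A's inner loop over Xs: appends, in Xs order, each distinct x that contains f and is not already in temp
theorem inner_eq (f : String) (Xs : List String) : ∀ temp : List String,
    Xs.foldl (fun t x => if PySem.Str.isIn f x ∧ x ∉ t then t ++ [x] else t) temp
      = temp ++ (fdedup Xs).filter (fun x => PySem.Str.isIn f x && !temp.contains x) := by
  induction Xs with
  | nil => intro temp; simp [fdedup]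
  | cons x xs ih =>
    intro temp
    rw [List.foldl_cons]
    by_cases hp : PySem.Str.isIn f x ∧ x ∉ temp
    · have hc : temp.contains x = false := by simpa using hp.2
      rw [if_pos hp, ih]
      simp only [fdedup, List.filter_cons, hp.1, hc, Bool.not_false, Bool.and_self]
      rw [if_pos trivial, List.append_assoc, List.singleton_append]
      congr 1
      have : (fun y => PySem.Str.isIn f y && !(temp ++ [x]).contains y)
           = (fun y => PySem.Str.isIn f y && (!(y == x) && !temp.contains y)) := by
        funext y
        by_cases h : y = x
        · subst h; simp
        · have hb : (y == x) = false := beq_eq_false_iff_ne.mpr h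
          simp [hb, h]
      rw [this, List.filter_filter]
      congr 1
      apply List.filter_congr
      intro y _
      cases hy : PySem.Str.isIn f y <;> cases hyx : (y == x) <;> simp
    · rw [if_neg hp, ih]
      congr 1
      simp only [fdedup, List.filter_cons]
      have hPx : (PySem.Str.isIn f x && !temp.contains x) = false := by
        by_cases hin : PySem.Str.isIn f x
        · have hxm : x ∈ temp := by
            by_contra hxm; exact hp ⟨hin, hxm⟩
          rw [List.contains_iff_mem.mpr hxm]
          simp
        · rw [Bool.eq_false_iff.mpr hin]
          simp
      rw [hPx, if_neg (by simp)]
      rw [filter_filter_ne _ _ _ hPx]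

-- membership in B's partial output
theorem mem_flat (D fs : List String) (x : String) :
    x ∈ (List.range fs.length).flatMap
        (fun i => D.filter (fun y => fs.findIdx? (fun f => PySem.Str.isIn f y) == some i))
      ↔ x ∈ D ∧ (fs.findIdx? (fun f => PySem.Str.isIn f x)).isSome := by
  simp only [List.mem_flatMap, List.mem_filter, List.mem_range, beq_iff_eq]
  constructor
  · rintro ⟨i, _, hxD, heq⟩
    exact ⟨hxD, by rw [heq]; rfl⟩
  · rintro ⟨hxD, hsome⟩
    rcases Option.isSome_iff_exists.mp hsome with ⟨i, hi⟩
    exact ⟨i, (List.findIdx?_eq_some_iff_findIdx_eq.mp hi).1, hxD, hi⟩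

-- A's outer loop equals B's bucket concatenation, for any fixed (deduplicated or not) D
theorem outer_eq (D : List String) (fin : List String) :
    fin.foldl (fun temp f => temp ++ D.filter (fun x => PySem.Str.isIn f x && !temp.contains x)) []
      = (List.range fin.length).flatMap
          (fun i => D.filter (fun x => fin.findIdx? (fun f => PySem.Str.isIn f x) == some i)) := by
  induction fin using List.reverseRecOn with
  | nil => simp
  | append_singleton fs f ih =>
    rw [List.foldl_append, List.foldl_cons, List.foldl_nil, ih]
    have hlen : (fs ++ [f]).length = fs.length + 1 := by simp
    rw [hlen, List.range_succ, List.flatMap_append, List.flatMap_cons, List.flatMap_nil,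
        List.append_nil]
    have hbucket : ∀ i ∈ List.range fs.length,
        D.filter (fun x => fs.findIdx? (fun g => PySem.Str.isIn g x) == some i)
          = D.filter (fun x => (fs ++ [f]).findIdx? (fun g => PySem.Str.isIn g x) == some i) := by
      intro i hi
      have hilt : i < fs.length := List.mem_range.mp hi
      apply List.filter_congr
      intro x _
      rw [List.findIdx?_append]
      cases hfs : fs.findIdx? (fun g => PySem.Str.isIn g x) with
      | some j => simp
      | none =>
        simp only [Option.none_or]
        cases hf : [f].findIdx? (fun g => PySem.Str.isIn g x) with
        | none => simp
        | some k =>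
          have hk : k = 0 := by
            have := (List.findIdx?_eq_some_iff_findIdx_eq.mp hf).1
            simp at this; omega
          subst hk
          simp only [Option.map_some, Nat.zero_add]
          have h1 : (some fs.length == some i) = false := by
            simp; omega
          have h2 : ((none : Option Nat) == some i) = false := rfl
          rw [h1, h2]
    have hflat := List.flatMap_congr hbucket
    rw [← hflat]
    congr 1
    apply List.filter_congr
    intro x hxD
    set T := (List.range fs.length).flatMap
        (fun i => D.filter (fun y => fs.findIdx? (fun g => PySem.Str.isIn g y) == some i)) with hT
    rw [List.findIdx?_append]
    by_cases hmemT : x ∈ T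
    · have hsome := ((mem_flat D fs x).mp hmemT).2
      rcases Option.isSome_iff_exists.mp hsome with ⟨j, hj⟩
      have hjlt := (List.findIdx?_eq_some_iff_findIdx_eq.mp hj).1
      have hc : T.contains x = true := List.contains_iff_mem.mpr hmemT
      rw [hj, hc]
      simp only [Option.some_or, Bool.not_true, Bool.and_false]
      have h1 : (some j == some fs.length) = false := by
        simp; omega
      rw [h1]
    · have hc : T.contains x = false := by
        by_contra h
        exact hmemT (List.contains_iff_mem.mp (by simpa using h))
      have hnone : fs.findIdx? (fun g => PySem.Str.isIn g x) = none := by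
        by_contra h
        exact hmemT ((mem_flat D fs x).mpr ⟨hxD, Option.isSome_iff_ne_none.mpr h⟩)
      rw [hnone, hc]
      simp only [Option.none_or, Bool.not_false, Bool.and_true]
      rw [List.findIdx?_cons]
      cases PySem.Str.isIn f x <;> simp [List.findIdx?_nil]

-- ===== VERDICT (by name: the statement is the Claim_ definition above) =====
theorem finalle_spec : Claim_equal_finalle := by
  intro X fin _
  unfold Spec_finalle
  show finalle X fin = finalle_alt X fin
  simp only [finalle, finalle_alt]
  rw [dedup_eq_fdedup]
  have hfm : ∀ i : Nat,
      (((fdedup (PySem.List.sorted (PySem.List.sorted X (fun x => x)) (fun x => PySem.Str.len x))).map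
          (fun x => (x, fin.findIdx? (fun f => PySem.Str.isIn f x)))).filter
            (fun p => p.2 == some i)).map (fun p => p.1)
        = (fdedup (PySem.List.sorted (PySem.List.sorted X (fun x => x)) (fun x => PySem.Str.len x))).filter
            (fun x => fin.findIdx? (fun f => PySem.Str.isIn f x) == some i) := by
    intro i
    rw [List.filter_map, List.map_map]
    simp [Function.comp_def]
  rw [List.flatMap_congr (fun i _ => hfm i), ← outer_eq]
  apply PySem.List.foldl_congr_mem'
  intro f _ temp
  exact inner_eq f _ temp
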